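-- pv_equiv track=rewrite | github.com/greg-randall/scrythe | functions.py | find_xpath_for_string
-- ===== SOURCE A (Python) =====
-- def find_xpath_for_string(xpaths_dict, html_fragments):
--     result = {}
--     for fragment in html_fragments:
--         for xpath, html in xpaths_dict.items():
--             if fragment in html:
--                 result[fragment] = xpath
--                 break
--     return result
-- ===== SOURCE B (Python) =====
-- def find_xpath_for_string(xpaths_dict, html_fragments):
--     # Loop inversion: scan each html once against the still-unmatched fragments,
--     # dropping fragments as soon as their first matching xpath is found.
--     found = {}
--     pending = list(dict.fromkeys(html_fragments))
--     for xpath, html in xpaths_dict.items():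
--         if not pending:
--             break
--         still = []
--         for f in pending:
--             if f in html:
--                 found[f] = xpath
--             else:
--                 still.append(f)
--         pending = still
--     return {f: found[f] for f in html_fragments if f in found}
-- ===== Notes on version B (the rewrite author's own statement) =====
-- stated objective: alternative
-- what changed: Inverted the loop nest: instead of rescanning the whole xpath dict for every fragment, B walks the xpaths once, matching each html against only the still-unmatched fragments (dropping a fragment on its first match) and stopping early when none remain, then reorders the result by fragment order.
import Mathlib
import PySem

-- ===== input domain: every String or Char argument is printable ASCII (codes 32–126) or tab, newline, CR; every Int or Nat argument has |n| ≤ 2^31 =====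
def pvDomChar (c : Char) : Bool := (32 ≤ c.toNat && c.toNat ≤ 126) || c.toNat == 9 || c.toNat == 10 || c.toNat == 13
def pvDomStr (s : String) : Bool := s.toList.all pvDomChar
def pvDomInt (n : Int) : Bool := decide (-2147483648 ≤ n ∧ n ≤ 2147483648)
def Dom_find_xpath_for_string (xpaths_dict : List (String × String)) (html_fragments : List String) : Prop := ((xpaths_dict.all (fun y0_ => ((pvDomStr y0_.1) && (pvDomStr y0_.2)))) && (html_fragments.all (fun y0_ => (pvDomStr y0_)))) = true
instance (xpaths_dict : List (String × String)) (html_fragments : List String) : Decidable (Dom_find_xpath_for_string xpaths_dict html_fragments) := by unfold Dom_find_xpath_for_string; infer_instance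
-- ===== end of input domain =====

-- B inverts A's loop nest: one pass over the xpaths against the still-unmatched fragments
-- (with early exit), then the result is reordered by fragment order; equivalence proved below.

-- ===== PORT A =====
-- A's inner 'for xpath, html in xpaths_dict.items(): if fragment in html: …; break'
def aScan (xpaths_dict : List (String × String)) (fragment : String) : Option String :=
  match xpaths_dict with
  | [] => none
  | (xpath, html) :: rest =>
      if PySem.Str.isIn fragment html then some xpath else aScan rest fragment

def find_xpath_for_string (xpaths_dict : List (String × String)) (html_fragments : List String) : List (String × String) :=
  (html_fragments.foldl
    (fun (result : PySem.Dict String String) fragment =>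
      match aScan xpaths_dict fragment with
      | some xpath => result.insert fragment xpath
      | none => result)
    PySem.Dict.empty).items

-- ===== PORT B =====
-- one xpath against the current pending fragments: matched go to found, rest to still
def bInner (found : PySem.Dict String String) (pending : List String) (xpath html : String) :
    PySem.Dict String String × List String :=
  pending.foldl
    (fun acc f =>
      if PySem.Str.isIn f html then (acc.1.insert f xpath, acc.2)
      else (acc.1, acc.2 ++ [f]))
    (found, [])

def find_xpath_for_string_alt (xpaths_dict : List (String × String)) (html_fragments : List String) : List (String × String) :=
  let st := xpaths_dict.foldl
    (fun (st : PySem.Dict String String × List String) kv =>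
      if st.2.isEmpty then st else bInner st.1 st.2 kv.1 kv.2)
    (PySem.Dict.empty, PySem.List.dedup html_fragments)
  (html_fragments.foldl
    (fun (res : PySem.Dict String String) f =>
      match st.1.get? f with
      | some x => res.insert f x
      | none => res)
    PySem.Dict.empty).items

-- ===== PRECONDITION & SPEC =====
def Spec_find_xpath_for_string (xpaths_dict : List (String × String)) (html_fragments : List String) (out : List (String × String)) : Prop := out = find_xpath_for_string_alt xpaths_dict html_fragments
instance (xpaths_dict : List (String × String)) (html_fragments : List String) (out : List (String × String)) : Decidable (Spec_find_xpath_for_string xpaths_dict html_fragments out) := by unfold Spec_find_xpath_for_string; infer_instance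

-- ===== CLAIM (what is proved, stated in full; the proofs are below) =====
def Claim_equal_find_xpath_for_string : Prop := ∀ (xpaths_dict : List (String × String)) (html_fragments : List String), Dom_find_xpath_for_string xpaths_dict html_fragments → Spec_find_xpath_for_string xpaths_dict html_fragments (find_xpath_for_string xpaths_dict html_fragments)

-- ===== LEMMAS AND PROOFS =====

-- bInner computes the matched-fragment inserts and the filtered pending list
theorem bInner_eq (html xpath : String) :
    ∀ (pending : List String) (found : PySem.Dict String String) (acc2 : List String),
    pending.foldl
      (fun acc f =>
        if PySem.Str.isIn f html then (acc.1.insert f xpath, acc.2)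
        else (acc.1, acc.2 ++ [f]))
      (found, acc2)
    = ((pending.filter (fun f => PySem.Str.isIn f html)).foldl
         (fun d f => d.insert f xpath) found,
       acc2 ++ pending.filter (fun f => ! PySem.Str.isIn f html)) := by
  intro pending
  induction pending with
  | nil => intro found acc2; simp
  | cons g rest ih =>
      intro found acc2
      rw [List.foldl_cons, ih]
      by_cases h : PySem.Chars.isIn g.toList html.toList = true
      · simp [h]
      · simp only [Bool.not_eq_true] at h
        simp [h]

-- get? after inserting a constant value for every key of a list
theorem get?_foldl_insert_const (xpath : String) :
    ∀ (l : List String) (d : PySem.Dict String String) (f : String),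
    (l.foldl (fun d g => d.insert g xpath) d).get? f
    = if f ∈ l then some xpath else d.get? f := by
  intro l
  induction l with
  | nil => intro d f; simp
  | cons g rest ih =>
      intro d f
      by_cases hr : f ∈ rest
      · simp [ih, hr]
      · by_cases hg : f = g
        · subst hg; simp [ih, hr, PySem.Dict.get?_insert_self]
        · simp [ih, hr, hg, PySem.Dict.get?_insert_of_ne _ _ hg]

-- main invariant of B's fold over the xpaths
theorem bFold_get? :
    ∀ (xd : List (String × String)) (found : PySem.Dict String String)
      (pending : List String) (f : String),
    (xd.foldl
      (fun (st : PySem.Dict String String × List String) kv =>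
        if st.2.isEmpty then st else bInner st.1 st.2 kv.1 kv.2)
      (found, pending)).1.get? f
    = if f ∈ pending then
        (match aScan xd f with
         | some x => some x
         | none => found.get? f)
      else found.get? f := by
  intro xd
  induction xd with
  | nil =>
      intro found pending f
      simp only [List.foldl_nil, aScan]
      split <;> rfl
  | cons kv rest ih =>
      intro found pending f
      obtain ⟨x, h⟩ := kv
      rw [List.foldl_cons]
      by_cases hpe : pending.isEmpty
      · have hnil : pending = [] := List.isEmpty_iff.mp hpe
        subst hnil
        have e : (if ((found, ([] : List String)).2.isEmpty = true)
              then (found, ([] : List String))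
              else bInner (found, ([] : List String)).1 (found, ([] : List String)).2
                     (x, h).1 (x, h).2) = (found, ([] : List String)) := rfl
        rw [e, ih]
        simp
      · rw [if_neg (by simpa using hpe)]
        have hb : bInner (found, pending).1 (found, pending).2 (x, h).1 (x, h).2
            = ((pending.filter (fun g => PySem.Str.isIn g h)).foldl
                 (fun d g => d.insert g x) found,
               pending.filter (fun g => ! PySem.Str.isIn g h)) := by
          simpa [bInner] using bInner_eq h x pending found []
        rw [hb, ih]
        by_cases hf : f ∈ pending
        · by_cases hm : PySem.Chars.isIn f.toList h.toList = true
          · simp [hf, hm, aScan, get?_foldl_insert_const, List.mem_filter]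
          · simp only [Bool.not_eq_true] at hm
            simp [hf, hm, aScan, get?_foldl_insert_const, List.mem_filter]
        · simp [hf, get?_foldl_insert_const, List.mem_filter]

-- ===== VERDICT (by name: the statement is the Claim_ definition above) =====
theorem find_xpath_for_string_spec : Claim_equal_find_xpath_for_string := by
  intro xd hf _
  unfold Spec_find_xpath_for_string find_xpath_for_string find_xpath_for_string_alt
  congr 1
  apply PySem.List.foldl_congr_mem
  intro acc f hfmem
  have hget := bFold_get? xd PySem.Dict.empty (PySem.List.dedup hf) f
  rw [hget]
  have hmem : f ∈ PySem.List.dedup hf := (PySem.List.mem_dedup _ _).mpr hfmem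
  simp only [hmem, if_pos]
  cases aScan xd f with
  | none => simp
  | some x => simp
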